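-- pv_equiv track=rewrite | github.com/gschramm/2023-MIC-ImageRecon-Shortcourse | zz_osem_varnet.py | distributed_subset_order
-- ===== SOURCE A (Python) =====
-- def distributed_subset_order(n: int) -> list[int]:
--     l = [x for x in range(n)]
--     o = []
--
--     for i in range(n):
--         if (i % 2) == 0:
--             o.append(l.pop(0))
--         else:
--             o.append(l.pop(len(l)//2))
--
--     return o
-- ===== SOURCE B (Python) =====
-- def distributed_subset_order(n: int) -> list[int]:
--     # Closed form: A's pop-front / pop-middle process interleaves the first
--     # half [0, h) with the second half [h, n), h = ceil(n/2).  O(n), one pass.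
--     h = (n + 1) // 2
--     out = []
--     for i in range(h):
--         out.append(i)
--         if h + i < n:
--             out.append(h + i)
--     return out
-- ===== Notes on version B (the rewrite author's own statement) =====
-- stated objective: faster
-- what changed: Replaces the quadratic pop-front/pop-middle simulation by the closed form it computes: interleave the first half [0,h) with the second half [h,n), h=(n+1)//2, built in one pass.
import Mathlib
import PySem

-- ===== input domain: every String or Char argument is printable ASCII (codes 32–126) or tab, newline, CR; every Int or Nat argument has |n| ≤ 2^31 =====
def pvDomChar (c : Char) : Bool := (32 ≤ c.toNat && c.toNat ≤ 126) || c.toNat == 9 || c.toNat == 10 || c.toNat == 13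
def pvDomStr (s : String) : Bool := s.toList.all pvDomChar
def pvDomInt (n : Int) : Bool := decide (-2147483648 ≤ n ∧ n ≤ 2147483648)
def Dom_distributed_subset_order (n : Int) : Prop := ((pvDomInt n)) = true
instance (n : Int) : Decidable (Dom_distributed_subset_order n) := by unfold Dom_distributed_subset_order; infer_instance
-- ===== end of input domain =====

-- B replaces A's quadratic pop-front/pop-middle simulation by the closed form it computes
-- (interleave [0,h) with [h,n), h = (n+1)//2), built in one pass.

-- ===== PORT A =====
-- hand port of Python's l.pop(k) for the nonnegative in-range k that A computes (none = IndexError),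
-- done in ONE list pass so the quadratic port stays evaluable in the interpreter; exact for 0 ≤ k
def pvPopIdx (xs : List Int) (k : Nat) : Option (Int × List Int) :=
  match xs, k with
  | [], _ => none
  | x :: rest, 0 => some (x, rest)
  | x :: rest, k + 1 => (pvPopIdx rest k).map (fun r => (r.1, x :: r.2))

-- loop body of A: even i does o.append(l.pop(0)), odd i does o.append(l.pop(len(l)//2)).
-- o is accumulated in reverse (Lean lists have no O(1) append) and reversed once at return;
-- the returned value is identical.
def pvStepA (st : List Int × List Int) (i : Int) : List Int × List Int :=
  if i % 2 = 0 then
    match st.1 with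
    | x :: rest => (rest, x :: st.2)
    | [] => st
  else
    match pvPopIdx st.1 (st.1.length / 2) with
    | some (x, rest) => (rest, x :: st.2)
    | none => st

def distributed_subset_order (n : Int) : List Int :=
  (((PySem.List.pyRange 0 n 1).foldl pvStepA (PySem.List.pyRange 0 n 1, [])).2).reverse

-- ===== PORT B =====
def distributed_subset_order_alt (n : Int) : List Int :=
  let h := PySem.Int.floordiv (n + 1) 2
  (PySem.List.pyRange 0 h 1).foldl
    (fun out i => let out := out ++ [i]; if h + i < n then out ++ [h + i] else out) []

-- ===== PRECONDITION & SPEC =====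
def Spec_distributed_subset_order (n : Int) (out : List Int) : Prop := out = distributed_subset_order_alt n
instance (n : Int) (out : List Int) : Decidable (Spec_distributed_subset_order n out) := by unfold Spec_distributed_subset_order; infer_instance

-- ===== CLAIM (what is proved, stated in full; the proofs are below) =====
def Claim_equal_distributed_subset_order : Prop := ∀ (n : Int), Dom_distributed_subset_order n → Spec_distributed_subset_order n (distributed_subset_order n)

-- ===== LEMMAS AND PROOFS =====

-- Remaining list of A's loop after k front/middle pair-pops, for n = m, h = (m+1)/2
def pvL (m h k : Nat) : List Int :=
  (List.range' k (h - k)).map (Nat.cast) ++ (List.range' (h + k) (m - (h + k))).map (Nat.cast)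

-- Output accumulated after k pair-pops
def pvO (h k : Nat) : List Int :=
  (List.range k).flatMap (fun (j : Nat) => [(j : Int), (h : Int) + (j : Int)])

lemma pv_fd2 (a : Nat) : PySem.Int.floordiv (a : Int) 2 = ((a / 2 : Nat) : Int) := by
  show ((a : Int)).fdiv 2 = _
  rw [Int.fdiv_eq_ediv_of_nonneg _ (by norm_num)]
  omega

lemma pvPopIdx_eq (xs : List Int) (k : Nat) (h : k < xs.length) :
    pvPopIdx xs k = some (xs[k], xs.eraseIdx k) := by
  induction xs generalizing k with
  | nil => simp at h
  | cons x rest ih =>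
    cases k with
    | zero => simp [pvPopIdx]
    | succ j =>
      have hj : j < rest.length := by simpa using h
      simp [pvPopIdx, ih j hj]

lemma pv_stepA_even (k : Nat) (x : Int) (xs acc : List Int) :
    pvStepA (x :: xs, acc) ((2 * k : Nat) : Int) = (xs, x :: acc) := by
  have h2 : ((2 * k : Nat) : Int) % 2 = 0 := by push_cast; omega
  simp only [pvStepA, if_pos h2]

lemma pv_stepA_odd (k : Nat) (lo : List Int) (a : Int) (hi acc : List Int)
    (hq : (lo.length + (1 + hi.length)) / 2 = lo.length) :
    pvStepA (lo ++ a :: hi, acc) ((2 * k + 1 : Nat) : Int) = (lo ++ hi, a :: acc) := by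
  have h2 : ¬ (((2 * k + 1 : Nat) : Int) % 2 = 0) := by push_cast; omega
  have hlen : (lo ++ a :: hi).length = lo.length + (1 + hi.length) := by
    rw [List.length_append, List.length_cons]; omega
  have hlt : lo.length < (lo ++ a :: hi).length := by
    rw [List.length_append, List.length_cons]; omega
  have hget : (lo ++ a :: hi)[lo.length]'hlt = a := by
    rw [List.getElem_append_right (Nat.le_refl _)]
    simp
  have herase : (lo ++ a :: hi).eraseIdx lo.length = lo ++ hi := by
    rw [List.eraseIdx_append_of_length_le (Nat.le_refl _)]
    simp
  simp only [pvStepA, if_neg h2, hlen, hq]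
  rw [pvPopIdx_eq _ _ (by rw [hlen]; omega)]
  -- the index (lo.length + (1 + hi.length)) / 2 was rewritten to lo.length by hq
  simp [hget, herase]

lemma pv_pyRange_cast (m : Nat) : PySem.List.pyRange 0 (m : Int) 1 = (List.range m).map (Nat.cast) := by
  rw [PySem.List.pyRange_one]
  simp

lemma pv_range0 (m h : Nat) (hm : h ≤ m) : pvL m h 0 = (List.range m).map (Nat.cast) := by
  rw [pvL, ← List.map_append]
  congr 1
  have h1 : List.range' 0 h ++ List.range' (0 + 1 * h) (m - h) = List.range' 0 (h + (m - h)) :=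
    List.range'_append
  simp only [Nat.zero_add, Nat.one_mul] at h1
  simp only [Nat.sub_zero, Nat.add_zero]
  rw [h1, show h + (m - h) = m from by omega, List.range_eq_range']

lemma pv_fold_pairs (m h : Nat) (hh : h = (m + 1) / 2) (p : Nat) (hp : 2 * p ≤ m) :
    List.foldl pvStepA ((List.range m).map (Nat.cast), []) ((List.range (2 * p)).map (Nat.cast))
      = (pvL m h p, (pvO h p).reverse) := by
  induction p with
  | zero => simp [pv_range0 m h (by omega), pvO]
  | succ q ih =>
    have hq2 : 2 * q ≤ m := by omega
    have hr : List.range (2 * (q + 1)) = List.range (2 * q) ++ [2 * q] ++ [2 * q + 1] := by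
      rw [show 2 * (q + 1) = ((2 * q) + 1) + 1 from by ring, List.range_succ, List.range_succ]
    rw [hr]
    simp only [List.map_append, List.foldl_append, ih hq2, List.map_cons, List.map_nil,
      List.foldl_cons, List.foldl_nil]
    have hqh : q + 1 ≤ h := by omega
    have hhi : 1 ≤ m - (h + q) := by omega
    have hlo : List.range' q (h - q) = q :: List.range' (q + 1) (h - q - 1) := by
      conv_lhs => rw [show h - q = (h - q - 1) + 1 from by omega]
      rw [List.range'_succ]
    have hhi2 : List.range' (h + q) (m - (h + q)) = (h + q) :: List.range' (h + q + 1) (m - (h + q) - 1) := by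
      conv_lhs => rw [show m - (h + q) = (m - (h + q) - 1) + 1 from by omega]
      rw [List.range'_succ]
    have e1 : pvL m h q = ((q : Nat) : Int) :: ((List.range' (q + 1) (h - q - 1)).map (Nat.cast) ++
        (List.range' (h + q) (m - (h + q))).map (Nat.cast)) := by
      rw [pvL, hlo]; simp
    rw [e1, pv_stepA_even]
    rw [hhi2]
    simp only [List.map_cons]
    rw [pv_stepA_odd q _ _ _ _ (by simp [List.length_range']; omega)]
    simp only [Prod.mk.injEq]
    refine ⟨?_, ?_⟩
    · rw [pvL, show h - (q + 1) = h - q - 1 from by omega,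
        show h + (q + 1) = h + q + 1 from by omega,
        show m - (h + q + 1) = m - (h + q) - 1 from by omega]
    · rw [pvO, pvO, List.range_succ, List.flatMap_append]
      push_cast
      simp [List.reverse_append]

lemma pv_foldB (hI n : Int) (q : Nat) (acc : List Int) :
    List.foldl (fun out i => let out := out ++ [i]; if hI + i < n then out ++ [hI + i] else out)
      acc ((List.range q).map (Nat.cast)) =
      acc ++ (List.range q).flatMap (fun j => ((j : Nat) : Int) :: if hI + ((j : Nat) : Int) < n then [hI + ((j : Nat) : Int)] else []) := by
  induction q generalizing acc with
  | zero => simp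
  | succ r ih =>
    rw [List.range_succ]
    simp only [List.map_append, List.foldl_append, ih, List.map_cons, List.map_nil,
      List.foldl_cons, List.foldl_nil, List.flatMap_append]
    by_cases hc : hI + ((r : Nat) : Int) < n <;> simp [hc]

-- even input n = p + p
lemma pv_main_even (p : Nat) :
    distributed_subset_order ((p + p : Nat) : Int) = distributed_subset_order_alt ((p + p : Nat) : Int) := by
  have hfold := pv_fold_pairs (p + p) p (by omega) p (by omega)
  rw [show 2 * p = p + p from by ring] at hfold
  rw [distributed_subset_order, pv_pyRange_cast, hfold]
  show ((pvO p p).reverse).reverse = _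
  rw [List.reverse_reverse]
  have hhI : PySem.Int.floordiv (((p + p : Nat) : Int) + 1) 2 = ((p : Nat) : Int) := by
    rw [show ((p + p : Nat) : Int) + 1 = ((p + p + 1 : Nat) : Int) from by push_cast; ring, pv_fd2]
    congr 1
    omega
  simp only [distributed_subset_order_alt]
  rw [hhI, pv_pyRange_cast, pv_foldB, List.nil_append, pvO]
  apply List.flatMap_congr
  intro j hj
  have hjp : j < p := List.mem_range.mp hj
  rw [if_pos (by push_cast; omega)]

-- odd input n = 2p + 1
lemma pv_main_odd (p : Nat) :
    distributed_subset_order ((2 * p + 1 : Nat) : Int) = distributed_subset_order_alt ((2 * p + 1 : Nat) : Int) := by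
  have hfold := pv_fold_pairs (2 * p + 1) (p + 1) (by omega) p (by omega)
  have hT : (List.range (2 * p + 1)).map (Nat.cast : Nat → Int)
      = (List.range (2 * p)).map Nat.cast ++ [((2 * p : Nat) : Int)] := by
    rw [List.range_succ]; simp
  have e1 : pvL (2 * p + 1) (p + 1) p = [((p : Nat) : Int)] := by
    rw [pvL, show (p + 1) - p = 1 from by omega, show 2 * p + 1 - ((p + 1) + p) = 0 from by omega]
    simp [List.range']
  have hA : distributed_subset_order ((2 * p + 1 : Nat) : Int) = pvO (p + 1) p ++ [((p : Nat) : Int)] := by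
    rw [distributed_subset_order, pv_pyRange_cast]
    calc ((((List.range (2 * p + 1)).map (Nat.cast : Nat → Int)).foldl pvStepA
            ((List.range (2 * p + 1)).map Nat.cast, [])).2).reverse
        = ((((List.range (2 * p)).map (Nat.cast : Nat → Int) ++ [((2 * p : Nat) : Int)]).foldl pvStepA
            ((List.range (2 * p + 1)).map Nat.cast, [])).2).reverse := by rw [hT]
      _ = pvO (p + 1) p ++ [((p : Nat) : Int)] := by
            rw [List.foldl_append, hfold, e1]
            simp only [List.foldl_cons, List.foldl_nil]
            rw [pv_stepA_even p]
            simp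
  rw [hA]
  have hhI : PySem.Int.floordiv (((2 * p + 1 : Nat) : Int) + 1) 2 = ((p + 1 : Nat) : Int) := by
    rw [show ((2 * p + 1 : Nat) : Int) + 1 = ((2 * p + 1 + 1 : Nat) : Int) from by push_cast; ring, pv_fd2]
    congr 1
    omega
  simp only [distributed_subset_order_alt]
  rw [hhI, pv_pyRange_cast, pv_foldB, List.nil_append]
  rw [List.range_succ, List.flatMap_append]
  have h1 : ([p] : List Nat).flatMap
      (fun j => ((j : Nat) : Int) :: if ((p + 1 : Nat) : Int) + ((j : Nat) : Int) < ((2 * p + 1 : Nat) : Int)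
        then [((p + 1 : Nat) : Int) + ((j : Nat) : Int)] else []) = [((p : Nat) : Int)] := by
    rw [List.flatMap_cons]
    rw [if_neg (by push_cast; omega)]
    simp
  rw [h1]
  congr 1
  rw [pvO]
  apply List.flatMap_congr
  intro j hj
  have hjp : j < p := List.mem_range.mp hj
  rw [if_pos (by push_cast; omega)]

lemma pv_neg (n : Int) (hn : n < 0) :
    distributed_subset_order n = distributed_subset_order_alt n := by
  have h1 : PySem.List.pyRange 0 n 1 = [] := PySem.List.pyRange_one_eq_nil (by omega)
  have h2 : PySem.Int.floordiv (n + 1) 2 ≤ 0 := by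
    show (n + 1).fdiv 2 ≤ 0
    rw [Int.fdiv_eq_ediv_of_nonneg _ (by norm_num)]
    omega
  have h3 : PySem.List.pyRange 0 (PySem.Int.floordiv (n + 1) 2) 1 = [] :=
    PySem.List.pyRange_one_eq_nil (by omega)
  rw [distributed_subset_order]
  simp only [distributed_subset_order_alt]
  rw [h1, h3]
  simp

-- ===== VERDICT (by name: the statement is the Claim_ definition above) =====
theorem distributed_subset_order_spec : Claim_equal_distributed_subset_order := by
  intro n _
  unfold Spec_distributed_subset_order
  rcases (by omega : 0 ≤ n ∨ n < 0) with hn | hn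
  · obtain ⟨m, rfl⟩ := Int.eq_ofNat_of_zero_le hn
    rcases Nat.even_or_odd m with ⟨p, rfl⟩ | ⟨p, rfl⟩
    · exact pv_main_even p
    · exact pv_main_odd p
  · exact pv_neg n hn
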